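-- pv_equiv track=rewrite | github.com/aditissigh24/raasta-ai-backend | onboarding_agent/nodes/present_chapters.py | _match_chapter
-- ===== SOURCE A (Python) =====
-- from typing import Optional
--
-- def _match_chapter(chapters: list, user_message: str) -> Optional[dict]:
--     """
--     Try to match the user's message to a chapter.
--
--     Matching order:
--     1. Exact ID match (chip sends the id directly)
--     2. Case-insensitive name match
--     3. Partial name match (user typed part of the name)
--     """
--     if not user_message or not chapters:
--         return None
--
--     msg = user_message.strip().lower()
--
--     for ch in chapters:
--         if str(ch.get("id", "")).lower() == msg:
--             return ch
--
--     for ch in chapters: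
--         if ch.get("name", "").lower() == msg:
--             return ch
--
--     for ch in chapters:
--         name_lower = ch.get("name", "").lower()
--         if msg in name_lower or name_lower in msg:
--             return ch
--
--     return None
-- ===== SOURCE B (Python) =====
-- from typing import Optional
--
-- def _match_chapter(chapters: list, user_message: str) -> Optional[dict]:
--     """Single pass keeping one candidate slot per tier; exact-id still early-returns."""
--     if not user_message or not chapters:
--         return None
--
--     msg = user_message.strip().lower()
--
--     name_match = None
--     partial_match = None
--     for ch in chapters:
--         if str(ch.get("id", "")).lower() == msg:
--             return ch
--         name_lower = ch.get("name", "").lower()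
--         if name_lower == msg:
--             if name_match is None:
--                 name_match = ch
--         elif msg in name_lower or name_lower in msg:
--             if partial_match is None:
--                 partial_match = ch
--
--     return name_match if name_match is not None else partial_match
-- ===== Notes on version B (the rewrite author's own statement) =====
-- stated objective: simpler
-- what changed: Replaces A's three sequential scans over chapters with one pass that early-returns on an exact id match and keeps the first exact-name and first partial-name candidates in two slots, choosing name over partial at the end.
import Mathlib
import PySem

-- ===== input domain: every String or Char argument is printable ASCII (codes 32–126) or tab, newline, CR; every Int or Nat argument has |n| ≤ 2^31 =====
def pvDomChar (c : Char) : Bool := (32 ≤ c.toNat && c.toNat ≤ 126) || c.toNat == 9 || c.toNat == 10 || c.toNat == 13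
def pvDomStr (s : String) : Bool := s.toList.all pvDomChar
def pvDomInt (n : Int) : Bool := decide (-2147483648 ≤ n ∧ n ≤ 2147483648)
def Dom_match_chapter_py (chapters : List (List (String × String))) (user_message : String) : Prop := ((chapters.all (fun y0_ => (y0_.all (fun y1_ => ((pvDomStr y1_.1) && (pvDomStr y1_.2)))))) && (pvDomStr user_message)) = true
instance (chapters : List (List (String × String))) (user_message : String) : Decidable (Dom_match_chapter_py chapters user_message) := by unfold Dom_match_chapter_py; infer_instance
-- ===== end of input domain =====

-- B replaces A's three sequential scans with one pass keeping per-tier candidate slots (objective: simpler).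


-- ===== PORT A =====
-- str(ch.get("id","")).lower() == msg  (values are strings, so str() is the identity)
def pvIdEq (msg : String) (ch : List (String × String)) : Bool :=
  PySem.Str.lower ((PySem.Dict.ofList ch).getD "id" "") == msg

-- ch.get("name","").lower() == msg
def pvNameEq (msg : String) (ch : List (String × String)) : Bool :=
  PySem.Str.lower ((PySem.Dict.ofList ch).getD "name" "") == msg

-- msg in name_lower or name_lower in msg
def pvPartial (msg : String) (ch : List (String × String)) : Bool :=
  let nl := PySem.Str.lower ((PySem.Dict.ofList ch).getD "name" "")
  PySem.Str.isIn msg nl || PySem.Str.isIn nl msg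

def match_chapter_py (chapters : List (List (String × String))) (user_message : String) : Option (List (String × String)) :=
  if user_message = "" ∨ chapters = [] then none
  else
    let msg := PySem.Str.lower (PySem.Str.strip user_message)
    match chapters.find? (pvIdEq msg) with
    | some ch => some ch
    | none =>
      match chapters.find? (pvNameEq msg) with
      | some ch => some ch
      | none => chapters.find? (pvPartial msg)

-- ===== PORT B =====
-- the single pass: early return on id, two candidate slots for name/partial
def pvLoop (msg : String) : List (List (String × String)) →
    Option (List (String × String)) → Option (List (String × String)) → Option (List (String × String))
  | [], nameMatch, partialMatch => if nameMatch ≠ none then nameMatch else partialMatch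
  | ch :: rest, nameMatch, partialMatch =>
    if PySem.Str.lower ((PySem.Dict.ofList ch).getD "id" "") == msg then some ch
    else
      let nameLower := PySem.Str.lower ((PySem.Dict.ofList ch).getD "name" "")
      if nameLower == msg then
        pvLoop msg rest (if nameMatch = none then some ch else nameMatch) partialMatch
      else if PySem.Str.isIn msg nameLower || PySem.Str.isIn nameLower msg then
        pvLoop msg rest nameMatch (if partialMatch = none then some ch else partialMatch)
      else
        pvLoop msg rest nameMatch partialMatch

def match_chapter_py_alt (chapters : List (List (String × String))) (user_message : String) : Option (List (String × String)) :=
  if user_message = "" ∨ chapters = [] then none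
  else
    let msg := PySem.Str.lower (PySem.Str.strip user_message)
    pvLoop msg chapters none none

-- ===== PRECONDITION & SPEC =====
def Spec_match_chapter_py (chapters : List (List (String × String))) (user_message : String) (out : Option (List (String × String))) : Prop := out = match_chapter_py_alt chapters user_message
instance (chapters : List (List (String × String))) (user_message : String) (out : Option (List (String × String))) : Decidable (Spec_match_chapter_py chapters user_message out) := by unfold Spec_match_chapter_py; infer_instance

-- ===== CLAIM (what is proved, stated in full; the proofs are below) =====
def Claim_equal_match_chapter_py : Prop := ∀ (chapters : List (List (String × String))) (user_message : String), Dom_match_chapter_py chapters user_message → Spec_match_chapter_py chapters user_message (match_chapter_py chapters user_message)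

-- ===== LEMMAS AND PROOFS =====

-- if some chapter id-matches, the single pass returns the first such chapter, whatever the slots hold
theorem pvLoop_id_found (msg : String) (chs : List (List (String × String)))
    (nm pm : Option (List (String × String))) (c : List (String × String))
    (h : chs.find? (pvIdEq msg) = some c) : pvLoop msg chs nm pm = some c := by
  induction chs generalizing nm pm with
  | nil => simp at h
  | cons ch rest ih =>
    by_cases hid : pvIdEq msg ch = true
    · rw [List.find?_cons_of_pos hid] at h
      cases h
      unfold pvIdEq at hid
      simp only [pvLoop]
      rw [if_pos hid]
    · rw [List.find?_cons_of_neg hid] at h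
      unfold pvIdEq at hid
      simp only [pvLoop]
      rw [if_neg hid]
      split
      · exact ih _ _ h
      · split
        · exact ih _ _ h
        · exact ih _ _ h

-- if no chapter id-matches, the pass resolves to the slots filled with the first finds of each lower tier
theorem pvLoop_no_id (msg : String) (chs : List (List (String × String)))
    (nm pm : Option (List (String × String)))
    (h : chs.find? (pvIdEq msg) = none) :
    pvLoop msg chs nm pm =
      let nm' := if nm = none then chs.find? (pvNameEq msg) else nm
      let pm' := if pm = none then chs.find? (fun ch => !pvNameEq msg ch && pvPartial msg ch) else pm
      if nm' ≠ none then nm' else pm' := by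
  induction chs generalizing nm pm with
  | nil => cases nm <;> cases pm <;> simp [pvLoop]
  | cons ch rest ih =>
    by_cases hid : pvIdEq msg ch = true
    · rw [List.find?_cons_of_pos hid] at h
      exact absurd h (by simp)
    · rw [List.find?_cons_of_neg hid] at h
      unfold pvIdEq at hid
      simp only [pvLoop]
      rw [if_neg hid]
      by_cases hnm : pvNameEq msg ch = true
      · have hnm' := hnm
        unfold pvNameEq at hnm'
        rw [if_pos hnm']
        rw [ih _ _ h]
        rw [List.find?_cons_of_pos (p := pvNameEq msg) hnm]
        rw [List.find?_cons_of_neg (p := fun c => !pvNameEq msg c && pvPartial msg c) (by simp [hnm])]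
        cases nm <;> simp
      · have hnm' := hnm
        unfold pvNameEq at hnm'
        rw [if_neg hnm']
        rw [List.find?_cons_of_neg (p := pvNameEq msg) hnm]
        by_cases hp : pvPartial msg ch = true
        · have hp' := hp
          unfold pvPartial at hp'
          rw [if_pos (by simpa using hp')]
          rw [ih _ _ h]
          rw [List.find?_cons_of_pos (p := fun c => !pvNameEq msg c && pvPartial msg c)
            (by simp [hnm, hp])]
          cases pm <;> simp
        · have hp' := hp
          unfold pvPartial at hp'
          rw [if_neg (by simpa using hp')]
          rw [ih _ _ h]
          rw [List.find?_cons_of_neg (p := fun c => !pvNameEq msg c && pvPartial msg c)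
            (by simp [hnm, hp])]

-- when no exact name match exists, the guarded partial find equals the plain partial find
theorem find?_partial_of_no_name (msg : String) (chs : List (List (String × String)))
    (h : chs.find? (pvNameEq msg) = none) :
    chs.find? (fun ch => !pvNameEq msg ch && pvPartial msg ch) = chs.find? (pvPartial msg) := by
  rw [List.find?_eq_none] at h
  induction chs with
  | nil => rfl
  | cons ch rest ih =>
    have hch : ¬ pvNameEq msg ch = true := h ch (by simp)
    rw [List.find?_cons, List.find?_cons]
    simp only [Bool.not_eq_true] at hch
    simp only [hch, Bool.not_false, Bool.true_and]
    split
    · rfl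
    · exact ih (fun c hc => h c (by simp [hc]))

-- ===== VERDICT (by name: the statement is the Claim_ definition above) =====
theorem match_chapter_py_spec : Claim_equal_match_chapter_py := by
  intro chapters user_message _
  unfold Spec_match_chapter_py
  simp only [match_chapter_py, match_chapter_py_alt]
  by_cases hg : user_message = "" ∨ chapters = []
  · simp [hg]
  · rw [if_neg hg, if_neg hg]
    cases hid : chapters.find? (pvIdEq (PySem.Str.lower (PySem.Str.strip user_message))) with
    | some c =>
      rw [pvLoop_id_found _ _ _ _ _ hid]
    | none =>
      rw [pvLoop_no_id _ _ _ _ hid]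
      cases hnm : chapters.find? (pvNameEq (PySem.Str.lower (PySem.Str.strip user_message))) with
      | some c => simp
      | none => simp [find?_partial_of_no_name _ _ hnm]
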